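-- pv_equiv track=rewrite | github.com/didiforgithub/AEnv | benchmarks/29_LogisticsPuzzle/env_validator.py | _get_reachable_positions
-- ===== SOURCE A (Python) =====
-- from typing import Dict, Any, List, Tuple, Optional
-- from collections import deque
--
-- def _get_reachable_positions(start_pos: Tuple[int, int],
--                             obstacles: List[Tuple[int, int]],
--                             layout: List[List[str]], H: int, W: int) -> set:
--     """Get all positions reachable by the agent using BFS"""
--     visited = {start_pos}
--     queue = deque([start_pos])
--     obstacles_set = set(obstacles)
--
--     while queue:
--         pos = queue.popleft()
--
--         for dr, dc in [(-1, 0), (1, 0), (0, -1), (0, 1)]: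
--             new_pos = (pos[0] + dr, pos[1] + dc)
--
--             if (0 <= new_pos[0] < H and 0 <= new_pos[1] < W and
--                 new_pos not in visited and
--                 layout[new_pos[0]][new_pos[1]] != 'E' and
--                 new_pos not in obstacles_set):
--
--                 visited.add(new_pos)
--                 queue.append(new_pos)
--
--     return visited
-- ===== SOURCE B (Python) =====
-- def _get_reachable_positions(start_pos, obstacles, layout, H, W):
--     """Queue-free fixpoint: repeatedly sweep the whole visited set, adding open
--     neighbours of every visited cell, until a full sweep adds nothing."""
--     obstacles_set = set(obstacles)
--     visited = {start_pos}
--     while True: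
--         prev_len = len(visited)
--         for r, c in list(visited):
--             for new_pos in ((r - 1, c), (r + 1, c), (r, c - 1), (r, c + 1)):
--                 if (0 <= new_pos[0] < H and 0 <= new_pos[1] < W and
--                         new_pos not in visited and
--                         layout[new_pos[0]][new_pos[1]] != 'E' and
--                         new_pos not in obstacles_set):
--                     visited.add(new_pos)
--         if len(visited) == prev_len:
--             return visited
-- ===== Notes on version B (the rewrite author's own statement) =====
-- stated objective: alternative
-- what changed: Replaces the deque-driven BFS (pop a frontier cell, push newly opened neighbours) by a queue-free fixpoint: repeatedly sweep the entire visited set, adding open neighbours of every visited cell, and stop when a full sweep adds nothing.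
-- outside the precondition, e.g. on _get_reachable_positions((0, 0), [], [['.'], ['E']], 3, 1): A returns {(0, 0)}, B returns {(0, 0)}
import Mathlib
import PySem

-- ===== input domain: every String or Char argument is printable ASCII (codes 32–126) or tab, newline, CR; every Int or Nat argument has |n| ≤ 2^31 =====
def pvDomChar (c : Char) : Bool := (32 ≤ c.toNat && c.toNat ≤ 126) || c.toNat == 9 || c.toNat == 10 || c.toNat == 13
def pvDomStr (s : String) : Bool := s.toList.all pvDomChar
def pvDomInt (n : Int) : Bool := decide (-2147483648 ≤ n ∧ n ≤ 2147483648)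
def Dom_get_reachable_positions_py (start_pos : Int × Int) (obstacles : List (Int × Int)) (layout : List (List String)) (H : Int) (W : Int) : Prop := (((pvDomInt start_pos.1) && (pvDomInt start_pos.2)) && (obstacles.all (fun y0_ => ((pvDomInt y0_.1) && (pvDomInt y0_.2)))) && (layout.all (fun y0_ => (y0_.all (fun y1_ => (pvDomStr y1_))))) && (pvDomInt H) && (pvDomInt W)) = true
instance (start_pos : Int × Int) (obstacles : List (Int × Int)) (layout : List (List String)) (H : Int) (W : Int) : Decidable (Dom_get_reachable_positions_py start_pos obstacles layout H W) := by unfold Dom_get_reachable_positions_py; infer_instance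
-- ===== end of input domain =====

-- ===== PORT A =====
-- B differs from the deque BFS of A only in control structure (queue-free fixpoint sweeps);
-- the eligibility test of a neighbour cell is the identical Python expression in both
-- sources, so it is shared as pvCond. The Nat fuel on both loops is a termination device
-- only; the equivalence proof shows H.toNat*W.toNat+1 always suffices.
def pvDirs : List (Int × Int) := [(-1, 0), (1, 0), (0, -1), (0, 1)]

-- layout[r][c] as a total function; Pre_ guarantees the probed indices are in range.
def pvCell (layout : List (List String)) (r c : Int) : String :=
  (PySem.List.pyGet? ((PySem.List.pyGet? layout r).getD []) c).getD ""

-- the if-condition of both Pythons, in source order: bounds, not-visited, layout ≠ 'E',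
-- not an obstacle ('new_pos not in obstacles_set' ↔ membership in the obstacles list).
def pvCond (obstacles : List (Int × Int)) (layout : List (List String)) (H W : Int)
    (V : List (Int × Int)) (n : Int × Int) : Bool :=
  decide (0 ≤ n.1) && decide (n.1 < H) && decide (0 ≤ n.2) && decide (n.2 < W) &&
  !(decide (n ∈ V)) && !(pvCell layout n.1 n.2 == "E") && !(decide (n ∈ obstacles))

-- A: one neighbour step; new cells are appended to visited AND to the queue tail.
def pvStepQ (obstacles : List (Int × Int)) (layout : List (List String)) (H W : Int)
    (u : Int × Int) (s : List (Int × Int) × List (Int × Int)) (d : Int × Int) :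
    List (Int × Int) × List (Int × Int) :=
  let n : Int × Int := (u.1 + d.1, u.2 + d.2)
  if pvCond obstacles layout H W s.1 n then (s.1 ++ [n], s.2 ++ [n]) else s

-- A: the while-queue loop (pop the head, scan its four neighbours, recurse).
def pvBfs (obstacles : List (Int × Int)) (layout : List (List String)) (H W : Int) :
    Nat → List (Int × Int) → List (Int × Int) → List (Int × Int)
  | 0, V, _ => V
  | _ + 1, V, [] => V
  | f + 1, V, u :: Q =>
      let s := List.foldl (pvStepQ obstacles layout H W u) (V, Q) pvDirs
      pvBfs obstacles layout H W f s.1 s.2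

def get_reachable_positions_py (start_pos : Int × Int) (obstacles : List (Int × Int)) (layout : List (List String)) (H : Int) (W : Int) : List (Int × Int) :=
  pvBfs obstacles layout H W (H.toNat * W.toNat + 1) [start_pos] [start_pos]

-- ===== PORT B =====
-- B: one neighbour step of the sweep (only visited is maintained, no queue).
def pvStep (obstacles : List (Int × Int)) (layout : List (List String)) (H W : Int)
    (u : Int × Int) (V : List (Int × Int)) (d : Int × Int) : List (Int × Int) :=
  let n : Int × Int := (u.1 + d.1, u.2 + d.2)
  if pvCond obstacles layout H W V n then V ++ [n] else V

-- B: scan the four neighbours of one visited cell.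
def pvScan (obstacles : List (Int × Int)) (layout : List (List String)) (H W : Int)
    (V : List (Int × Int)) (u : Int × Int) : List (Int × Int) :=
  List.foldl (pvStep obstacles layout H W u) V pvDirs

-- B: one full sweep over a snapshot of the visited set.
def pvPass (obstacles : List (Int × Int)) (layout : List (List String)) (H W : Int)
    (V : List (Int × Int)) : List (Int × Int) :=
  List.foldl (pvScan obstacles layout H W) V V

-- B: iterate sweeps until one adds nothing.
def pvFix (obstacles : List (Int × Int)) (layout : List (List String)) (H W : Int) :
    Nat → List (Int × Int) → List (Int × Int)
  | 0, V => V
  | g + 1, V =>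
      let V' := pvPass obstacles layout H W V
      if V'.length = V.length then V' else pvFix obstacles layout H W g V'

def get_reachable_positions_py_alt (start_pos : Int × Int) (obstacles : List (Int × Int)) (layout : List (List String)) (H : Int) (W : Int) : List (Int × Int) :=
  pvFix obstacles layout H W (H.toNat * W.toNat + 1) [start_pos]

-- ===== PRECONDITION & SPEC =====
-- Pre_ admits the inputs on which the BFS provably never probes a missing layout cell:
-- either no neighbour of start_pos is inside the H x W bounds (layout is never indexed),
-- or the first H rows exist and each has at least W cells. It excludes layouts smaller
-- than the declared H x W grid, on which the Pythons can hit an IndexError probing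
-- layout[r][c]; that also excludes some inputs where every missing cell happens to be
-- unreachable (there both Pythons still return, with the same value) — see claim cites.
def Pre_get_reachable_positions_py (start_pos : Int × Int) (obstacles : List (Int × Int)) (layout : List (List String)) (H : Int) (W : Int) : Prop :=
  (¬ ((0 ≤ start_pos.1 - 1 ∧ start_pos.1 - 1 < H ∧ 0 ≤ start_pos.2 ∧ start_pos.2 < W) ∨
      (0 ≤ start_pos.1 + 1 ∧ start_pos.1 + 1 < H ∧ 0 ≤ start_pos.2 ∧ start_pos.2 < W) ∨
      (0 ≤ start_pos.1 ∧ start_pos.1 < H ∧ 0 ≤ start_pos.2 - 1 ∧ start_pos.2 - 1 < W) ∨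
      (0 ≤ start_pos.1 ∧ start_pos.1 < H ∧ 0 ≤ start_pos.2 + 1 ∧ start_pos.2 + 1 < W))) ∨
  (H ≤ (layout.length : Int) ∧ ∀ row ∈ layout.take H.toNat, W ≤ (row.length : Int))
instance (start_pos : Int × Int) (obstacles : List (Int × Int)) (layout : List (List String)) (H : Int) (W : Int) : Decidable (Pre_get_reachable_positions_py start_pos obstacles layout H W) := by unfold Pre_get_reachable_positions_py; infer_instance

def pvWitness_get_reachable_positions_py : (Int × Int) × (List (Int × Int)) × List (List String) × Int × Int :=
  ((0, 0), [(1, 1)], [[".", "."], [".", "E"]], 2, 2)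

def Spec_get_reachable_positions_py (start_pos : Int × Int) (obstacles : List (Int × Int)) (layout : List (List String)) (H : Int) (W : Int) (out : List (Int × Int)) : Prop := out = get_reachable_positions_py_alt start_pos obstacles layout H W
instance (start_pos : Int × Int) (obstacles : List (Int × Int)) (layout : List (List String)) (H : Int) (W : Int) (out : List (Int × Int)) : Decidable (Spec_get_reachable_positions_py start_pos obstacles layout H W out) := by unfold Spec_get_reachable_positions_py; infer_instance

-- ===== CLAIM (what is proved, stated in full; the proofs are below) =====
def Claim_equal_get_reachable_positions_py : Prop := ∀ (start_pos : Int × Int) (obstacles : List (Int × Int)) (layout : List (List String)) (H : Int) (W : Int), Dom_get_reachable_positions_py start_pos obstacles layout H W → Pre_get_reachable_positions_py start_pos obstacles layout H W → Spec_get_reachable_positions_py start_pos obstacles layout H W (get_reachable_positions_py start_pos obstacles layout H W)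

-- ===== LEMMAS AND PROOFS =====

-- a cell passes the static part of the condition (bounds, layout, obstacles)
def pvOk (obstacles : List (Int × Int)) (layout : List (List String)) (H W : Int)
    (n : Int × Int) : Bool :=
  decide (0 ≤ n.1) && decide (n.1 < H) && decide (0 ≤ n.2) && decide (n.2 < W) &&
  !(pvCell layout n.1 n.2 == "E") && !(decide (n ∈ obstacles))

-- u is saturated in V: every open neighbour of u is already in V
def pvSat (obstacles : List (Int × Int)) (layout : List (List String)) (H W : Int)
    (V : List (Int × Int)) (u : Int × Int) : Prop :=
  ∀ d ∈ pvDirs, pvOk obstacles layout H W (u.1 + d.1, u.2 + d.2) = true →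
    (u.1 + d.1, u.2 + d.2) ∈ V

-- enumeration of the in-bounds cells, plus the start cell
def pvCells (H W : Int) : List (Int × Int) :=
  (PySem.List.pyRange 0 H 1).flatMap fun r => (PySem.List.pyRange 0 W 1).map fun c => (r, c)

lemma pvCond_iff (ob : List (Int × Int)) (lay : List (List String)) (H W : Int)
    (V : List (Int × Int)) (n : Int × Int) :
    pvCond ob lay H W V n = true ↔ (pvOk ob lay H W n = true ∧ n ∉ V) := by
  simp [pvCond, pvOk]; tauto

lemma pvStep_ext (ob : List (Int × Int)) (lay : List (List String)) (H W : Int)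
    (u : Int × Int) : ∀ (ds : List (Int × Int)) (V : List (Int × Int)),
    ∃ t, List.foldl (pvStep ob lay H W u) V ds = V ++ t := by
  intro ds
  induction ds with
  | nil => intro V; exact ⟨[], by simp⟩
  | cons d ds ih =>
    intro V
    simp only [List.foldl_cons, pvStep]
    split
    · obtain ⟨t, ht⟩ := ih (V ++ [(u.1 + d.1, u.2 + d.2)])
      exact ⟨(u.1 + d.1, u.2 + d.2) :: t, by simp [ht]⟩
    · exact ih V

lemma pvScan_ext (ob : List (Int × Int)) (lay : List (List String)) (H W : Int)
    (V : List (Int × Int)) (u : Int × Int) :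
    ∃ t, pvScan ob lay H W V u = V ++ t := pvStep_ext ob lay H W u pvDirs V

lemma pvFold_ext (ob : List (Int × Int)) (lay : List (List String)) (H W : Int) :
    ∀ (L V : List (Int × Int)), ∃ t, List.foldl (pvScan ob lay H W) V L = V ++ t := by
  intro L
  induction L with
  | nil => intro V; exact ⟨[], by simp⟩
  | cons a L ih =>
    intro V
    obtain ⟨t1, h1⟩ := pvScan_ext ob lay H W V a
    obtain ⟨t2, h2⟩ := ih (pvScan ob lay H W V a)
    rw [h1] at h2
    exact ⟨t1 ++ t2, by rw [List.foldl_cons, h1, h2, List.append_assoc]⟩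

lemma pvStepQ_pair (ob : List (Int × Int)) (lay : List (List String)) (H W : Int)
    (u : Int × Int) : ∀ (ds : List (Int × Int)) (V Q : List (Int × Int)),
    List.foldl (pvStepQ ob lay H W u) (V, Q) ds =
      (List.foldl (pvStep ob lay H W u) V ds,
       Q ++ (List.foldl (pvStep ob lay H W u) V ds).drop V.length) := by
  intro ds
  induction ds with
  | nil => intro V Q; simp
  | cons d ds ih =>
    intro V Q
    simp only [List.foldl_cons, pvStepQ, pvStep]
    split
    · rw [ih]
      obtain ⟨t, ht⟩ := pvStep_ext ob lay H W u ds (V ++ [(u.1 + d.1, u.2 + d.2)])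
      rw [ht, Prod.mk.injEq]
      refine ⟨rfl, ?_⟩
      rw [List.drop_left]
      rw [show V ++ [(u.1 + d.1, u.2 + d.2)] ++ t = V ++ ((u.1 + d.1, u.2 + d.2) :: t) by
        simp]
      rw [List.drop_left]
      simp
    · exact ih V Q

lemma pvBfs_nil (ob : List (Int × Int)) (lay : List (List String)) (H W : Int)
    (f : Nat) (V : List (Int × Int)) : pvBfs ob lay H W f V [] = V := by
  cases f <;> rfl

lemma pvBfs_pass (ob : List (Int × Int)) (lay : List (List String)) (H W : Int) :
    ∀ (F : List (Int × Int)) (f : Nat) (V R : List (Int × Int)),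
    pvBfs ob lay H W (F.length + f) V (F ++ R) =
      pvBfs ob lay H W f (List.foldl (pvScan ob lay H W) V F)
        (R ++ (List.foldl (pvScan ob lay H W) V F).drop V.length) := by
  intro F
  induction F with
  | nil => intro f V R; simp
  | cons u F ih =>
    intro f V R
    have hlen : (u :: F).length + f = (F.length + f) + 1 := by simp; omega
    rw [hlen]
    show pvBfs ob lay H W (F.length + f + 1) V (u :: (F ++ R)) = _
    rw [pvBfs]
    rw [pvStepQ_pair ob lay H W u pvDirs V (F ++ R)]
    set V1 := List.foldl (pvStep ob lay H W u) V pvDirs with hV1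
    have hscan : pvScan ob lay H W V u = V1 := rfl
    obtain ⟨new, hnew⟩ := pvScan_ext ob lay H W V u
    rw [hscan] at hnew
    have hdrop1 : V1.drop V.length = new := by rw [hnew, List.drop_left]
    obtain ⟨t, htt⟩ := pvFold_ext ob lay H W F V1
    simp only [hdrop1]
    rw [List.append_assoc]
    rw [ih f V1 (R ++ new)]
    simp only [List.foldl_cons, hscan]
    congr 1
    rw [htt, hnew, List.drop_left]
    rw [show V ++ new ++ t = V ++ (new ++ t) by simp]
    rw [List.drop_left]
    simp

lemma pvSat_mono (ob : List (Int × Int)) (lay : List (List String)) (H W : Int)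
    (V t : List (Int × Int)) (u : Int × Int) (h : pvSat ob lay H W V u) :
    pvSat ob lay H W (V ++ t) u := by
  intro d hd hok
  exact List.mem_append_left t (h d hd hok)

lemma pvScan_of_sat (ob : List (Int × Int)) (lay : List (List String)) (H W : Int)
    (V : List (Int × Int)) (u : Int × Int) (h : pvSat ob lay H W V u) :
    pvScan ob lay H W V u = V := by
  unfold pvScan
  have : ∀ ds : List (Int × Int), (∀ d ∈ ds, d ∈ pvDirs) →
      List.foldl (pvStep ob lay H W u) V ds = V := by
    intro ds
    induction ds with
    | nil => intro _; rfl
    | cons d ds ih =>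
      intro hsub
      simp only [List.foldl_cons, pvStep]
      rw [if_neg, ih (fun x hx => hsub x (List.mem_cons_of_mem d hx))]
      intro hc
      obtain ⟨hok, hmem⟩ := (pvCond_iff ob lay H W V _).1 hc
      exact hmem (h d (hsub d List.mem_cons_self) hok)
  exact this pvDirs (fun d hd => hd)

lemma pvScan_sat_self (ob : List (Int × Int)) (lay : List (List String)) (H W : Int)
    (V : List (Int × Int)) (u : Int × Int) :
    pvSat ob lay H W (pvScan ob lay H W V u) u := by
  unfold pvScan
  have : ∀ ds V, ∀ d ∈ ds, pvOk ob lay H W (u.1 + d.1, u.2 + d.2) = true →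
      (u.1 + d.1, u.2 + d.2) ∈ List.foldl (pvStep ob lay H W u) V ds := by
    intro ds
    induction ds with
    | nil => intro V d hd; cases hd
    | cons d' ds ih =>
      intro V d hd hok
      rcases List.mem_cons.1 hd with rfl | hd'
      · -- membership of n after its own step, preserved by extension
        have hmem : (u.1 + d.1, u.2 + d.2) ∈ pvStep ob lay H W u V d := by
          simp only [pvStep]
          split
          · simp
          · rename_i hc
            by_cases hv : (u.1 + d.1, u.2 + d.2) ∈ V
            · exact hv
            · exact absurd ((pvCond_iff ob lay H W V _).2 ⟨hok, hv⟩) hc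
        obtain ⟨t, ht⟩ := pvStep_ext ob lay H W u ds (pvStep ob lay H W u V d)
        rw [List.foldl_cons, ht]
        exact List.mem_append_left t hmem
      · rw [List.foldl_cons]
        exact ih _ d hd' hok
  exact fun d hd hok => this pvDirs V d hd hok

lemma pvFold_sat (ob : List (Int × Int)) (lay : List (List String)) (H W : Int) :
    ∀ (F V : List (Int × Int)) (u : Int × Int), u ∈ F →
      pvSat ob lay H W (List.foldl (pvScan ob lay H W) V F) u := by
  intro F
  induction F with
  | nil => intro V u hu; cases hu
  | cons a F ih =>
    intro V u hu
    rcases List.mem_cons.1 hu with rfl | hu'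
    · rw [List.foldl_cons]
      obtain ⟨t, ht⟩ := pvFold_ext ob lay H W F (pvScan ob lay H W V u)
      rw [ht]
      exact pvSat_mono ob lay H W _ t u (pvScan_sat_self ob lay H W V u)
    · rw [List.foldl_cons]
      exact ih _ u hu'

lemma pvFold_of_sat (ob : List (Int × Int)) (lay : List (List String)) (H W : Int) :
    ∀ (P V : List (Int × Int)), (∀ u ∈ P, pvSat ob lay H W V u) →
      List.foldl (pvScan ob lay H W) V P = V := by
  intro P
  induction P with
  | nil => intro V _; rfl
  | cons p P ih =>
    intro V h
    rw [List.foldl_cons, pvScan_of_sat ob lay H W V p (h p List.mem_cons_self)]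
    exact ih V (fun u hu => h u (List.mem_cons_of_mem p hu))

lemma pvOk_mem_cells (ob : List (Int × Int)) (lay : List (List String)) (H W : Int)
    (n : Int × Int) (h : pvOk ob lay H W n = true) : n ∈ pvCells H W := by
  unfold pvOk at h
  simp only [Bool.and_eq_true, decide_eq_true_eq] at h
  obtain ⟨⟨⟨⟨⟨h1, h2⟩, h3⟩, h4⟩, _⟩, _⟩ := h
  unfold pvCells
  exact List.mem_flatMap.2 ⟨n.1, PySem.List.mem_pyRange_one.2 ⟨h1, h2⟩,
    List.mem_map.2 ⟨n.2, PySem.List.mem_pyRange_one.2 ⟨h3, h4⟩, Prod.mk.eta⟩⟩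

lemma pvScan_inv (ob : List (Int × Int)) (lay : List (List String)) (H W : Int)
    (C : List (Int × Int)) (hC : ∀ n, pvOk ob lay H W n = true → n ∈ C) (u : Int × Int) :
    ∀ (ds V : List (Int × Int)), V.Nodup → (∀ x ∈ V, x ∈ C) →
      (List.foldl (pvStep ob lay H W u) V ds).Nodup ∧
      (∀ x ∈ List.foldl (pvStep ob lay H W u) V ds, x ∈ C) := by
  intro ds
  induction ds with
  | nil => intro V h1 h2; exact ⟨h1, h2⟩
  | cons d ds ih =>
    intro V h1 h2
    rw [List.foldl_cons]
    simp only [pvStep]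
    split
    · rename_i hc
      obtain ⟨hok, hmem⟩ := (pvCond_iff ob lay H W V _).1 hc
      refine ih _ ?_ ?_
      · exact List.Nodup.append h1 (List.nodup_singleton _)
          (List.disjoint_singleton.2 hmem)
      · intro x hx
        rcases List.mem_append.1 hx with hx | hx
        · exact h2 x hx
        · rw [List.mem_singleton.1 hx]; exact hC _ hok
    · exact ih V h1 h2

lemma pvFold_inv (ob : List (Int × Int)) (lay : List (List String)) (H W : Int)
    (C : List (Int × Int)) (hC : ∀ n, pvOk ob lay H W n = true → n ∈ C) :
    ∀ (L V : List (Int × Int)), V.Nodup → (∀ x ∈ V, x ∈ C) →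
      (List.foldl (pvScan ob lay H W) V L).Nodup ∧
      (∀ x ∈ List.foldl (pvScan ob lay H W) V L, x ∈ C) := by
  intro L
  induction L with
  | nil => intro V h1 h2; exact ⟨h1, h2⟩
  | cons a L ih =>
    intro V h1 h2
    rw [List.foldl_cons]
    obtain ⟨h1', h2'⟩ := pvScan_inv ob lay H W C hC a pvDirs V h1 h2
    exact ih _ h1' h2'

lemma pvLen_le (C V : List (Int × Int)) (h1 : V.Nodup) (h2 : ∀ x ∈ V, x ∈ C) :
    V.length ≤ C.length :=
  (h1.subperm h2).length_le

-- the core: BFS from a queue F and fixpoint sweeps agree, given visited = P ++ F with P saturated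
lemma pvMain (ob : List (Int × Int)) (lay : List (List String)) (H W : Int)
    (C : List (Int × Int)) (hC : ∀ n, pvOk ob lay H W n = true → n ∈ C) :
    ∀ (g f : Nat) (V P F : List (Int × Int)),
      V = P ++ F → (∀ u ∈ P, pvSat ob lay H W V u) →
      V.Nodup → (∀ x ∈ V, x ∈ C) →
      C.length ≤ f + P.length → C.length + 1 ≤ g + V.length →
      pvBfs ob lay H W f V F = pvFix ob lay H W g V := by
  intro g
  induction g with
  | zero =>
    intro f V P F hV hsat h1 h2 hf hg
    have := pvLen_le C V h1 h2
    omega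
  | succ g ih =>
    intro f V P F hV hsat h1 h2 hf hg
    have hVC := pvLen_le C V h1 h2
    have hVlen : V.length = P.length + F.length := by rw [hV]; simp
    have hFf : F.length ≤ f := by omega
    have hfoldP : List.foldl (pvScan ob lay H W) V P = V :=
      pvFold_of_sat ob lay H W P V hsat
    have hpass : pvPass ob lay H W V = List.foldl (pvScan ob lay H W) V F := by
      unfold pvPass
      conv_lhs => rw [show (List.foldl (pvScan ob lay H W) V V : List (Int × Int))
        = List.foldl (pvScan ob lay H W) V (P ++ F) by rw [← hV]]
      rw [List.foldl_append, hfoldP]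
    obtain ⟨t, ht⟩ := pvFold_ext ob lay H W F V
    obtain ⟨f', rfl⟩ : ∃ f', f = F.length + f' := ⟨f - F.length, by omega⟩
    have hbfs := pvBfs_pass ob lay H W F f' V []
    rw [List.append_nil, ht, List.nil_append, List.drop_left] at hbfs
    by_cases hstop : t = []
    · subst hstop
      rw [List.append_nil] at hbfs ht
      rw [hbfs, pvBfs_nil]
      simp [pvFix, hpass, ht]
    · have hgrow : 0 < t.length := List.length_pos_iff.2 hstop
      have hfix : pvFix ob lay H W (g + 1) V = pvFix ob lay H W g (V ++ t) := by
        rw [pvFix]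
        simp only [hpass, ht]
        rw [if_neg (by simp; omega)]
      rw [hbfs, hfix]
      have hVt : V ++ t = List.foldl (pvScan ob lay H W) V F := ht.symm
      obtain ⟨hnd, hsub⟩ := pvFold_inv ob lay H W C hC F V h1 h2
      rw [← hVt] at hnd hsub
      apply ih f' (V ++ t) V t rfl ?_ hnd hsub (by omega) (by simp; omega)
      intro u hu
      rw [hV] at hu
      rcases List.mem_append.1 hu with hu | hu
      · exact pvSat_mono ob lay H W V t u (hV ▸ hsat u hu)
      · rw [hVt]
        exact pvFold_sat ob lay H W F V u hu

lemma pvCells_length (H W : Int) : (pvCells H W).length = H.toNat * W.toNat := by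
  unfold pvCells
  rw [List.length_flatMap]
  simp [PySem.List.length_pyRange_one]

-- ===== VERDICT (by name: the statement is the Claim_ definition above) =====
theorem get_reachable_positions_py_spec : Claim_equal_get_reachable_positions_py := by
  intro start_pos ob lay H W _ _
  unfold Spec_get_reachable_positions_py get_reachable_positions_py get_reachable_positions_py_alt
  have hC : ∀ n, pvOk ob lay H W n = true → n ∈ start_pos :: pvCells H W :=
    fun n h => List.mem_cons_of_mem _ (pvOk_mem_cells ob lay H W n h)
  have hlen : (start_pos :: pvCells H W).length = H.toNat * W.toNat + 1 := by
    simp [pvCells_length]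
  apply pvMain ob lay H W (start_pos :: pvCells H W) hC
    (H.toNat * W.toNat + 1) (H.toNat * W.toNat + 1) [start_pos] [] [start_pos] rfl
  · intro u hu; cases hu
  · simp
  · intro x hx; rw [List.mem_singleton.1 hx]; exact List.mem_cons_self
  · simp [hlen]
  · simp [hlen]
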